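-- pv_equiv track=rewrite | github.com/RyanPersson/knowlpedia | scripts/fix-multiline-dollar-math.py | find_and_fix_multiline_dollar_blocks
-- ===== SOURCE A (Python) =====
-- def find_and_fix_multiline_dollar_blocks(content: str) -> str:
--     """Find and collapse multi-line $$ blocks that have 2+ lines of LaTeX content.
--
--     Single-line content like:
--         $$
--         x = y
--         $$
--     is fine and left alone.
--
--     Only multi-line content like:
--         $$
--         x = y
--         z = w
--         $$
--     needs to be collapsed.
--     """
--     lines = content.split('\n')
--     result = []
--     i = 0
--
--     while i < len(lines):
--         line = lines[i]
--         stripped = line.strip()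
--
--         # Check if this line is just $$
--         if stripped == '$$':
--             indent = line[:len(line) - len(line.lstrip())]
--
--             # Look for the closing $$
--             math_lines = []
--             j = i + 1
--             while j < len(lines):
--                 inner_line = lines[j]
--                 inner_stripped = inner_line.strip()
--                 if inner_stripped == '$$':
--                     # Found closing $$
--                     # Only collapse if there are 2+ lines of LaTeX content
--                     if len(math_lines) > 1:
--                         collapsed = ' '.join(' '.join(math_lines).split())
--                         result.append(f'{indent}$${collapsed}$$')
--                     else:
--                         # Single line content - keep original format
--                         result.append(line)  # opening $$
--                         for ml in math_lines:
--                             result.append(ml)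
--                         result.append(lines[j])  # closing $$
--                     i = j + 1
--                     break
--                 else:
--                     math_lines.append(inner_line)
--                     j += 1
--             else:
--                 # No closing $$ found, keep line as-is
--                 result.append(line)
--                 i += 1
--         else:
--             result.append(line)
--             i += 1
--
--     return '\n'.join(result)
-- ===== SOURCE B (Python) =====
-- def find_and_fix_multiline_dollar_blocks(content: str) -> str:
--     """Single flat pass with an in-block state machine instead of a nested scan."""
--     out = []
--     in_block = False
--     opener = ''
--     indent = ''
--     buf = []
--     for line in content.split('\n'):
--         stripped = line.strip()
--         if not in_block:
--             if stripped == '$$':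
--                 in_block = True
--                 opener = line
--                 indent = line[:len(line) - len(line.lstrip())]
--                 buf = []
--             else:
--                 out.append(line)
--         else:
--             if stripped == '$$':
--                 if len(buf) > 1:
--                     collapsed = ' '.join(' '.join(buf).split())
--                     out.append(f'{indent}$${collapsed}$$')
--                 else:
--                     out.append(opener)
--                     out.extend(buf)
--                     out.append(line)
--                 in_block = False
--             else:
--                 buf.append(line)
--     if in_block:
--         out.append(opener)
--         out.extend(buf)
--     return '\n'.join(out)
-- ===== Notes on version B (the rewrite author's own statement) =====
-- stated objective: simpler
-- what changed: Replaces A's nested inner while-scan with index jumping by a single flat pass over the lines maintaining an in-block flag, the opener line, its indent and a buffer, with a post-loop flush for an unclosed block.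
import Mathlib
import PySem

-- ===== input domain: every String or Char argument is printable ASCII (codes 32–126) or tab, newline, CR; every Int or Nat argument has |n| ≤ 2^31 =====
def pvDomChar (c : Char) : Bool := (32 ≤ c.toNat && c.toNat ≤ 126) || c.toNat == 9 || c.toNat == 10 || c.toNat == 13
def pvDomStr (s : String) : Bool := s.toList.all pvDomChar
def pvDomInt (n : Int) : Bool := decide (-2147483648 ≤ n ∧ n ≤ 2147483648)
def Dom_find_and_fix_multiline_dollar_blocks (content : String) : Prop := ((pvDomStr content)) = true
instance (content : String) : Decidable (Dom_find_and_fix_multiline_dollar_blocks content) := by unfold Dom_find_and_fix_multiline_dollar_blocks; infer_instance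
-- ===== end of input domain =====

-- B replaces A's nested inner scan (index jumping) by one flat pass with an in-block flag and a buffer; objective: simpler, same O(n) cost.

-- shared tiny helpers (both Pythons contain these exact expressions)
def pvDD : List Char := ['$', '$']

-- line[:len(line) - len(line.lstrip())]
def pvIndent (l : List Char) : List Char :=
  PySem.List.slice l none (some ((l.length : Int) - ((PySem.Chars.lstrip l).length : Int)))

-- ' '.join(' '.join(ms).split())
def pvCollapse (ms : List (List Char)) : List Char :=
  PySem.Chars.join [' '] (PySem.Chars.split₀ (PySem.Chars.join [' '] ms))

-- ===== PORT A =====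
-- A's inner while loop: scan for the first line stripping to '$$', returning
-- (math_lines, the closing line, the lines after it); none = loop fell through (no closer).
def pvScanA (xs : List (List Char)) : Option (List (List Char) × List Char × List (List Char)) :=
  match xs with
  | [] => none
  | x :: rest =>
    if PySem.Chars.strip x = pvDD then some ([], x, rest)
    else
      match pvScanA rest with
      | none => none
      | some (m, c, a) => some (x :: m, c, a)

theorem pvScanA_length {xs : List (List Char)} {m c a}
    (h : pvScanA xs = some (m, c, a)) : a.length < xs.length := by
  induction xs generalizing m c a with
  | nil => simp [pvScanA] at h
  | cons x rest ih =>
    simp only [pvScanA] at h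
    split at h
    · cases h; simp
    · cases hr : pvScanA rest with
      | none => rw [hr] at h; cases h
      | some t =>
        obtain ⟨m', c', a'⟩ := t
        rw [hr] at h; cases h
        exact Nat.lt_succ_of_lt (ih hr)

-- A's outer while loop over the remaining lines.
def pvLoopA (xs : List (List Char)) : List (List Char) :=
  match xs with
  | [] => []
  | l :: rest =>
    if PySem.Chars.strip l = pvDD then
      match h : pvScanA rest with
      | some (m, c, a) =>
        (if m.length > 1 then [pvIndent l ++ pvDD ++ pvCollapse m ++ pvDD]
         else l :: (m ++ [c])) ++ pvLoopA a
      | none => l :: pvLoopA rest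
    else l :: pvLoopA rest
termination_by xs.length
decreasing_by
  · exact Nat.lt_succ_of_lt (pvScanA_length h)
  · simp
  · simp

def find_and_fix_multiline_dollar_blocks (content : String) : String :=
  String.mk (PySem.Chars.join ['\n'] (pvLoopA (PySem.Chars.splitOn content.toList ['\n'])))

-- ===== PORT B =====
-- one step of B's flat loop; state = (out, in_block, opener, indent, buf)
def pvStepB (st : List (List Char) × Bool × List Char × List Char × List (List Char))
    (line : List Char) : List (List Char) × Bool × List Char × List Char × List (List Char) :=
  match st with
  | (out, inb, opener, indent, buf) =>
    if inb then
      if PySem.Chars.strip line = pvDD then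
        (out ++ (if buf.length > 1 then [indent ++ pvDD ++ pvCollapse buf ++ pvDD]
                 else opener :: (buf ++ [line])), false, opener, indent, buf)
      else (out, true, opener, indent, buf ++ [line])
    else
      if PySem.Chars.strip line = pvDD then (out, true, line, pvIndent line, [])
      else (out ++ [line], false, opener, indent, buf)

-- after the loop: if still in a block, flush the opener and the buffered lines
def pvFlushB (st : List (List Char) × Bool × List Char × List Char × List (List Char)) :
    List (List Char) :=
  match st with
  | (out, inb, opener, _, buf) => if inb then out ++ opener :: buf else out

def find_and_fix_multiline_dollar_blocks_alt (content : String) : String :=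
  String.mk (PySem.Chars.join ['\n']
    (pvFlushB ((PySem.Chars.splitOn content.toList ['\n']).foldl pvStepB ([], false, [], [], []))))

-- ===== PRECONDITION & SPEC =====
def Spec_find_and_fix_multiline_dollar_blocks (content : String) (out : String) : Prop := out = find_and_fix_multiline_dollar_blocks_alt content
instance (content : String) (out : String) : Decidable (Spec_find_and_fix_multiline_dollar_blocks content out) := by unfold Spec_find_and_fix_multiline_dollar_blocks; infer_instance

-- ===== CLAIM (what is proved, stated in full; the proofs are below) =====
def Claim_equal_find_and_fix_multiline_dollar_blocks : Prop := ∀ (content : String), Dom_find_and_fix_multiline_dollar_blocks content → Spec_find_and_fix_multiline_dollar_blocks content (find_and_fix_multiline_dollar_blocks content)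

-- ===== LEMMAS AND PROOFS =====

-- if no line strips to '$$', A's loop copies the lines verbatim
theorem pvLoopA_of_scan_none {xs : List (List Char)} (h : pvScanA xs = none) :
    pvLoopA xs = xs := by
  induction xs with
  | nil => simp [pvLoopA]
  | cons x rest ih =>
    simp only [pvScanA] at h
    split at h
    · cases h
    · rename_i hx
      cases hr : pvScanA rest with
      | none =>
        rw [pvLoopA]
        simp [hx, ih hr]
      | some t => obtain ⟨m', c', a'⟩ := t; rw [hr] at h; cases h

-- the two foldl invariants, proved together by strong induction on the length
theorem pvB_invariant (n : Nat) : ∀ (xs : List (List Char)), xs.length ≤ n →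
    (∀ out opener indent buf,
      pvFlushB (xs.foldl pvStepB (out, true, opener, indent, buf)) =
        out ++ (match pvScanA xs with
          | none => opener :: (buf ++ xs)
          | some (m, c, a) =>
            (if (buf ++ m).length > 1 then [indent ++ pvDD ++ pvCollapse (buf ++ m) ++ pvDD]
             else opener :: ((buf ++ m) ++ [c])) ++ pvLoopA a)) ∧
    (∀ out opener indent buf,
      pvFlushB (xs.foldl pvStepB (out, false, opener, indent, buf)) = out ++ pvLoopA xs) := by
  induction n with
  | zero =>
    intro xs hlen
    have hx : xs = [] := List.length_eq_zero_iff.mp (Nat.le_zero.mp hlen)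
    subst hx
    constructor
    · intro out opener indent buf
      simp [pvScanA, pvFlushB]
    · intro out opener indent buf
      simp [pvLoopA, pvFlushB]
  | succ n ih =>
    intro xs hlen
    cases xs with
    | nil =>
      constructor
      · intro out opener indent buf; simp [pvScanA, pvFlushB]
      · intro out opener indent buf; simp [pvLoopA, pvFlushB]
    | cons l rest =>
      have hrest : rest.length ≤ n := Nat.lt_succ_iff.mp (by simpa using hlen)
      constructor
      · -- in-block invariant
        intro out opener indent buf
        by_cases hl : PySem.Chars.strip l = pvDD
        · -- closing line
          have step : pvStepB (out, true, opener, indent, buf) l =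
              (out ++ (if buf.length > 1 then [indent ++ pvDD ++ pvCollapse buf ++ pvDD]
                       else opener :: (buf ++ [l])), false, opener, indent, buf) := by
            simp [pvStepB, hl]
          rw [List.foldl_cons, step, (ih rest hrest).2]
          simp [pvScanA, hl, List.append_assoc]
        · -- buffered line
          have step : pvStepB (out, true, opener, indent, buf) l =
              (out, true, opener, indent, buf ++ [l]) := by
            simp [pvStepB, hl]
          rw [List.foldl_cons, step, (ih rest hrest).1]
          simp only [pvScanA, hl]
          cases hr : pvScanA rest with
          | none => simp
          | some t =>
            obtain ⟨m, c, a⟩ := t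
            simp [List.append_assoc]
      · -- out-of-block invariant
        intro out opener indent buf
        by_cases hl : PySem.Chars.strip l = pvDD
        · -- opener
          have step : pvStepB (out, false, opener, indent, buf) l =
              (out, true, l, pvIndent l, []) := by
            simp [pvStepB, hl]
          rw [List.foldl_cons, step, (ih rest hrest).1]
          rw [pvLoopA]
          simp only [hl]
          cases hr : pvScanA rest with
          | none =>
            simp [pvLoopA_of_scan_none hr]
          | some t =>
            obtain ⟨m, c, a⟩ := t
            simp
        · -- ordinary line
          have step : pvStepB (out, false, opener, indent, buf) l =
              (out ++ [l], false, opener, indent, buf) := by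
            simp [pvStepB, hl]
          rw [List.foldl_cons, step, (ih rest hrest).2]
          rw [pvLoopA]
          simp [hl]

-- ===== VERDICT (by name: the statement is the Claim_ definition above) =====
theorem find_and_fix_multiline_dollar_blocks_spec : Claim_equal_find_and_fix_multiline_dollar_blocks := by
  intro content _
  unfold Spec_find_and_fix_multiline_dollar_blocks
  unfold find_and_fix_multiline_dollar_blocks find_and_fix_multiline_dollar_blocks_alt
  have h := (pvB_invariant (PySem.Chars.splitOn content.toList ['\n']).length
      (PySem.Chars.splitOn content.toList ['\n']) le_rfl).2 [] [] [] []
  rw [h]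
  simp
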